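-- pv_equiv track=rewrite | github.com/khalilpreview/DARK-MATER-MCP-Kali-Server | mcp_tools/parsers.py | parse_harvester_text
-- ===== SOURCE A (Python) =====
-- from typing import Dict, Any, List, Optional, Union
--
-- def parse_harvester_text(output: str) -> Dict[str, Any]:
--     """Parse theHarvester text output."""
--     results = {
--         "emails": [],
--         "hosts": [],
--         "ips": [],
--         "urls": []
--     }
--
--     current_section = None
--     lines = output.split('\n')
--
--     for line in lines:
--         line = line.strip()
--
--         if 'emails found:' in line.lower():
--             current_section = 'emails'
--         elif 'hosts found:' in line.lower():
--             current_section = 'hosts'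
--         elif 'ip addresses found:' in line.lower():
--             current_section = 'ips'
--         elif 'urls found:' in line.lower():
--             current_section = 'urls'
--         elif line and current_section and not line.startswith('-'):
--             if current_section in results:
--                 results[current_section].append(line)
--
--     return results
-- ===== SOURCE B (Python) =====
-- def _section_of(line):
--     low = line.lower()
--     if 'emails found:' in low:
--         return 'emails'
--     if 'hosts found:' in low:
--         return 'hosts'
--     if 'ip addresses found:' in low:
--         return 'ips'
--     if 'urls found:' in low:
--         return 'urls'
--     return None
--
--
-- def parse_harvester_text(output: str):
--     """Parse theHarvester text output (chunked two-phase rewrite)."""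
--     lines = [ln.strip() for ln in output.split('\n')]
--
--     # Phase 1: group the document into (section, body-lines) chunks.
--     chunks = []
--     for ln in lines:
--         sec = _section_of(ln)
--         if sec is not None:
--             chunks.append((sec, []))
--         elif chunks:
--             chunks[-1][1].append(ln)
--
--     # Phase 2: assemble each category from its chunks, filtering noise lines.
--     def collect(key):
--         return [ln for sec, body in chunks if sec == key
--                 for ln in body if ln and not ln.startswith('-')]
--
--     return {k: collect(k) for k in ("emails", "hosts", "ips", "urls")}
-- ===== Notes on version B (the rewrite author's own statement) =====
-- stated objective: alternative
-- what changed: B replaces A's single stateful scan (a current_section variable plus appends into a mutable result dict) by a two-phase decomposition: phase 1 groups the stripped lines into (section, body) chunks, phase 2 assembles each of the four categories from its chunks with the noise filter applied per key.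
import Mathlib
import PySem

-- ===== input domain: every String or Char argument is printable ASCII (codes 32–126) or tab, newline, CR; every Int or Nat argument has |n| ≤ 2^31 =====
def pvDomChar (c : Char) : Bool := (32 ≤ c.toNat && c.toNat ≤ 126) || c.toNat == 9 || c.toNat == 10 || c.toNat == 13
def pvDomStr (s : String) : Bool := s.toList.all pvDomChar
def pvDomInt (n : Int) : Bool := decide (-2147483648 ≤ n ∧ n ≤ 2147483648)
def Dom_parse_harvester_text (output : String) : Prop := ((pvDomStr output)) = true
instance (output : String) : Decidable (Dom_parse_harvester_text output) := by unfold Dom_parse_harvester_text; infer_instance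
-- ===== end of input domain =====

-- B first groups the document into (section, body) chunks, then assembles each category
-- per key from its chunks, instead of A's single stateful scan into a mutable dict
-- (objective: alternative decomposition, same cost).

-- ===== PORT A =====
-- one loop step of A: strip, the elif header chain, the guarded append into the dict
def pvStepA (st : PySem.Dict String (List String) × Option String) (line0 : String) :
    PySem.Dict String (List String) × Option String :=
  let results := st.1
  let current_section := st.2
  let line := PySem.Str.strip line0
  if PySem.Str.isIn "emails found:" (PySem.Str.lower line) then (results, some "emails")
  else if PySem.Str.isIn "hosts found:" (PySem.Str.lower line) then (results, some "hosts")
  else if PySem.Str.isIn "ip addresses found:" (PySem.Str.lower line) then (results, some "ips")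
  else if PySem.Str.isIn "urls found:" (PySem.Str.lower line) then (results, some "urls")
  else if (line != "") && current_section.isSome && !(PySem.Str.startswith line "-") then
    match current_section with
    | some sec =>
        if results.contains sec then (results.modify sec [] (fun l => l ++ [line]), current_section)
        else (results, current_section)
    | none => (results, current_section)
  else (results, current_section)

def parse_harvester_text (output : String) : List (String × List String) :=
  let results : PySem.Dict String (List String) :=
    PySem.Dict.ofList [("emails", []), ("hosts", []), ("ips", []), ("urls", [])]
  -- output.split('\n'): the separator is the non-empty literal '\n', so split? is `some`
  let lines := (PySem.Str.split? output "\n").getD []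
  (lines.foldl pvStepA (results, none)).1.items

-- ===== PORT B =====
-- _section_of helper of Source B
def pvSectionOf (line : String) : Option String :=
  let low := PySem.Str.lower line
  if PySem.Str.isIn "emails found:" low then some "emails"
  else if PySem.Str.isIn "hosts found:" low then some "hosts"
  else if PySem.Str.isIn "ip addresses found:" low then some "ips"
  else if PySem.Str.isIn "urls found:" low then some "urls"
  else none

-- the filter `if ln and not ln.startswith('-')` inside Source B's collect
def pvKeep (line : String) : Bool := (line != "") && !(PySem.Str.startswith line "-")

-- chunks[-1][1].append(ln); no-op on an empty chunk list, as Source B's `elif chunks` guard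
def pvAppendLast (cs : List (String × List String)) (ln : String) : List (String × List String) :=
  match cs with
  | [] => []
  | [c] => [(c.1, c.2 ++ [ln])]
  | c :: c' :: rest => c :: pvAppendLast (c' :: rest) ln

-- one iteration of Source B's phase-1 grouping loop
def pvChunkStep (cs : List (String × List String)) (ln : String) : List (String × List String) :=
  match pvSectionOf ln with
  | some s => cs ++ [(s, [])]
  | none => pvAppendLast cs ln

-- Source B's collect(key) comprehension
def pvCollect (chunks : List (String × List String)) (key : String) : List String :=
  (chunks.filter (fun c => c.1 == key)).flatMap (fun c => c.2.filter pvKeep)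

def parse_harvester_text_alt (output : String) : List (String × List String) :=
  let lines := ((PySem.Str.split? output "\n").getD []).map PySem.Str.strip
  let chunks := lines.foldl pvChunkStep []
  [("emails", pvCollect chunks "emails"), ("hosts", pvCollect chunks "hosts"),
   ("ips", pvCollect chunks "ips"), ("urls", pvCollect chunks "urls")]

-- ===== PRECONDITION & SPEC =====
def Spec_parse_harvester_text (output : String) (out : List (String × List String)) : Prop := out = parse_harvester_text_alt output
instance (output : String) (out : List (String × List String)) : Decidable (Spec_parse_harvester_text output out) := by unfold Spec_parse_harvester_text; infer_instance

-- ===== CLAIM (what is proved, stated in full; the proofs are below) =====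
def Claim_equal_parse_harvester_text : Prop := ∀ (output : String), Dom_parse_harvester_text output → Spec_parse_harvester_text output (parse_harvester_text output)

-- ===== LEMMAS AND PROOFS =====

-- the shape of every dict A's loop ever holds
def pvMkD (e h i u : List String) : PySem.Dict String (List String) :=
  PySem.Dict.mk [("emails", e), ("hosts", h), ("ips", i), ("urls", u)]

-- A's current_section is the section of B's last chunk
def pvLastSec (cs : List (String × List String)) : Option String :=
  cs.getLast?.map Prod.fst

-- pvStepA with the strip factored out of the step
def pvStepA0 (st : PySem.Dict String (List String) × Option String) (line : String) :
    PySem.Dict String (List String) × Option String :=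
  if PySem.Str.isIn "emails found:" (PySem.Str.lower line) then (st.1, some "emails")
  else if PySem.Str.isIn "hosts found:" (PySem.Str.lower line) then (st.1, some "hosts")
  else if PySem.Str.isIn "ip addresses found:" (PySem.Str.lower line) then (st.1, some "ips")
  else if PySem.Str.isIn "urls found:" (PySem.Str.lower line) then (st.1, some "urls")
  else if (line != "") && st.2.isSome && !(PySem.Str.startswith line "-") then
    match st.2 with
    | some sec =>
        if st.1.contains sec then (st.1.modify sec [] (fun l => l ++ [line]), st.2)
        else (st.1, st.2)
    | none => (st.1, st.2)
  else (st.1, st.2)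

theorem pvCollect_nil (k : String) : pvCollect [] k = [] := rfl

theorem pvCollect_cons (c : String × List String) (cs : List (String × List String)) (k : String) :
    pvCollect (c :: cs) k = (if c.1 == k then c.2.filter pvKeep else []) ++ pvCollect cs k := by
  simp only [pvCollect, List.filter_cons]
  by_cases h : c.1 == k <;> simp [h]

theorem pvCollect_append_header (cs : List (String × List String)) (s k : String) :
    pvCollect (cs ++ [(s, [])]) k = pvCollect cs k := by
  simp only [pvCollect, List.filter_append, List.flatMap_append]
  by_cases h : s == k <;> simp [h]

theorem pvLastSec_append_header (cs : List (String × List String)) (s : String) :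
    pvLastSec (cs ++ [(s, [])]) = some s := by
  simp [pvLastSec]

theorem pvAppendLast_ne_nil (c : String × List String) (cs : List (String × List String))
    (ln : String) : pvAppendLast (c :: cs) ln ≠ [] := by
  cases cs <;> simp [pvAppendLast]

theorem pvLastSec_appendLast : ∀ (cs : List (String × List String)) (ln : String),
    pvLastSec (pvAppendLast cs ln) = pvLastSec cs
  | [], _ => rfl
  | [c], ln => by simp [pvAppendLast, pvLastSec]
  | c :: c' :: rest, ln => by
      have ih := pvLastSec_appendLast (c' :: rest) ln
      have hstep : pvAppendLast (c :: c' :: rest) ln = c :: pvAppendLast (c' :: rest) ln := rfl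
      rw [hstep]
      cases hX : pvAppendLast (c' :: rest) ln with
      | nil => exact absurd hX (pvAppendLast_ne_nil c' rest ln)
      | cons y ys =>
          rw [hX] at ih
          simp only [pvLastSec, List.getLast?_cons_cons]
          simpa [pvLastSec] using ih

theorem pvCollect_appendLast : ∀ (cs : List (String × List String)) (ln k : String), cs ≠ [] →
    pvCollect (pvAppendLast cs ln) k =
      pvCollect cs k ++ (if pvLastSec cs = some k ∧ pvKeep ln = true then [ln] else [])
  | [], _, _, hne => absurd rfl hne
  | [c], ln, k, _ => by
      show pvCollect [(c.1, c.2 ++ [ln])] k = _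
      rw [pvCollect_cons, pvCollect_cons]
      simp only [pvCollect_nil, List.append_nil, List.filter_append]
      have hls : pvLastSec [c] = some c.1 := by simp [pvLastSec]
      rw [hls]
      by_cases hk : c.1 == k
      · have hkeq : c.1 = k := eq_of_beq hk
        by_cases hkeep : pvKeep ln = true
        · simp [hkeq, hkeep]
        · simp [hkeq, hkeep]
      · have hkne : c.1 ≠ k := fun he => absurd (beq_iff_eq.mpr he) hk
        have hcond : ¬ (some c.1 = some k ∧ pvKeep ln = true) := fun hcd =>
          hkne (Option.some.inj hcd.1)
        simp only [hk, Bool.false_eq_true, if_false, if_neg hcond, List.append_nil]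
  | c :: c' :: rest, ln, k, _ => by
      have ih := pvCollect_appendLast (c' :: rest) ln k (by simp)
      show pvCollect (c :: pvAppendLast (c' :: rest) ln) k = _
      rw [pvCollect_cons, pvCollect_cons, ih]
      have hls : pvLastSec (c :: c' :: rest) = pvLastSec (c' :: rest) := by
        simp [pvLastSec]
      rw [hls, List.append_assoc]

-- pvSectionOf only ever yields one of the four fixed keys
theorem pvSectionOf_mem (l s : String) (h : pvSectionOf l = some s) :
    s = "emails" ∨ s = "hosts" ∨ s = "ips" ∨ s = "urls" := by
  simp only [pvSectionOf] at h
  split_ifs at h <;> simp_all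

theorem pvAppendLast_sections : ∀ (cs : List (String × List String)) (ln : String)
    (c : String × List String), c ∈ pvAppendLast cs ln → ∃ c' ∈ cs, c.1 = c'.1
  | [], _, c, hc => by simp [pvAppendLast] at hc
  | [d], ln, c, hc => by
      simp only [pvAppendLast, List.mem_singleton] at hc
      exact ⟨d, by simp, by simp [hc]⟩
  | d :: d' :: rest, ln, c, hc => by
      simp only [pvAppendLast, List.mem_cons] at hc
      rcases hc with h | h
      · exact ⟨d, by simp, by simp [h]⟩
      · obtain ⟨c', hc', he⟩ := pvAppendLast_sections (d' :: rest) ln c h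
        exact ⟨c', by simp [List.mem_cons] at hc' ⊢; tauto, he⟩

def pvGoodSec (s : String) : Prop := s = "emails" ∨ s = "hosts" ∨ s = "ips" ∨ s = "urls"

theorem pvChunkStep_sections (cs : List (String × List String)) (ln : String)
    (hcs : ∀ c ∈ cs, pvGoodSec c.1) : ∀ c ∈ pvChunkStep cs ln, pvGoodSec c.1 := by
  intro c hc
  simp only [pvChunkStep] at hc
  cases hsec : pvSectionOf ln with
  | some s =>
      rw [hsec] at hc
      rcases List.mem_append.mp hc with h | h
      · exact hcs c h
      · simp only [List.mem_singleton] at h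
        subst h
        exact pvSectionOf_mem ln s hsec
  | none =>
      rw [hsec] at hc
      obtain ⟨c', hc', he⟩ := pvAppendLast_sections cs ln c hc
      rw [he]; exact hcs c' hc'

-- dict facts on the fixed four-key shape
theorem pvContains_emails (e h i u : List String) : (pvMkD e h i u).contains "emails" = true := by
  simp [pvMkD, PySem.Dict.contains]
theorem pvContains_hosts (e h i u : List String) : (pvMkD e h i u).contains "hosts" = true := by
  simp [pvMkD, PySem.Dict.contains]
theorem pvContains_ips (e h i u : List String) : (pvMkD e h i u).contains "ips" = true := by
  simp [pvMkD, PySem.Dict.contains]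
theorem pvContains_urls (e h i u : List String) : (pvMkD e h i u).contains "urls" = true := by
  simp [pvMkD, PySem.Dict.contains]

theorem pvModify_emails (e h i u : List String) (x : String) :
    (pvMkD e h i u).modify "emails" [] (fun l => l ++ [x]) = pvMkD (e ++ [x]) h i u := by
  simp [pvMkD, PySem.Dict.modify, PySem.Dict.insert, PySem.Dict.getD, PySem.Dict.get?]
theorem pvModify_hosts (e h i u : List String) (x : String) :
    (pvMkD e h i u).modify "hosts" [] (fun l => l ++ [x]) = pvMkD e (h ++ [x]) i u := by
  simp [pvMkD, PySem.Dict.modify, PySem.Dict.insert, PySem.Dict.getD, PySem.Dict.get?]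
theorem pvModify_ips (e h i u : List String) (x : String) :
    (pvMkD e h i u).modify "ips" [] (fun l => l ++ [x]) = pvMkD e h (i ++ [x]) u := by
  simp [pvMkD, PySem.Dict.modify, PySem.Dict.insert, PySem.Dict.getD, PySem.Dict.get?]
theorem pvModify_urls (e h i u : List String) (x : String) :
    (pvMkD e h i u).modify "urls" [] (fun l => l ++ [x]) = pvMkD e h i (u ++ [x]) := by
  simp [pvMkD, PySem.Dict.modify, PySem.Dict.insert, PySem.Dict.getD, PySem.Dict.get?]

-- abbreviation for the A-state that corresponds to a chunk list
def pvState (cs : List (String × List String)) :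
    PySem.Dict String (List String) × Option String :=
  (pvMkD (pvCollect cs "emails") (pvCollect cs "hosts") (pvCollect cs "ips") (pvCollect cs "urls"),
   pvLastSec cs)

-- pvStepA0 on a header line
theorem pvStepA0_header (st : PySem.Dict String (List String) × Option String) (l s : String)
    (h : pvSectionOf l = some s) : pvStepA0 st l = (st.1, some s) := by
  simp only [pvSectionOf] at h
  unfold pvStepA0
  split_ifs at h ⊢ <;> simp_all

-- pvStepA0 on a non-header line
theorem pvStepA0_body (st : PySem.Dict String (List String) × Option String) (l : String)
    (h : pvSectionOf l = none) :
    pvStepA0 st l =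
      if (l != "") && st.2.isSome && !(PySem.Str.startswith l "-") then
        match st.2 with
        | some sec =>
            if st.1.contains sec then (st.1.modify sec [] (fun ls => ls ++ [l]), st.2)
            else (st.1, st.2)
        | none => (st.1, st.2)
      else (st.1, st.2) := by
  simp only [pvSectionOf] at h
  unfold pvStepA0
  split_ifs at h ⊢ <;> simp_all

theorem pvStepA0_body_keep (st : PySem.Dict String (List String) × Option String) (l : String)
    (h : pvSectionOf l = none) (sec : String) (hst : st.2 = some sec)
    (hkeep : pvKeep l = true) :
    pvStepA0 st l =
      if st.1.contains sec then (st.1.modify sec [] (fun ls => ls ++ [l]), some sec)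
      else (st.1, some sec) := by
  rw [pvStepA0_body st l h, hst]
  have hg : ((l != "") && (some sec : Option String).isSome && !(PySem.Str.startswith l "-"))
      = true := by
    simp only [pvKeep, Bool.and_eq_true] at hkeep ⊢
    exact ⟨⟨hkeep.1, rfl⟩, hkeep.2⟩
  rw [hg]
  simp

theorem pvStepA0_body_skip (st : PySem.Dict String (List String) × Option String) (l : String)
    (h : pvSectionOf l = none) (hskip : pvKeep l = false ∨ st.2 = none) :
    pvStepA0 st l = (st.1, st.2) := by
  rw [pvStepA0_body st l h]
  rcases hskip with hk | hn
  · have hg : ((l != "") && st.2.isSome && !(PySem.Str.startswith l "-")) = false := by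
      simp only [pvKeep, Bool.and_eq_false_iff] at hk
      rcases hk with hk | hk
      · rw [Bool.and_eq_false_iff]; left; rw [Bool.and_eq_false_iff]; left; exact hk
      · rw [Bool.and_eq_false_iff]; right; exact hk
    rw [hg]
    simp
  · rw [hn]
    simp

-- one step: A's transition tracks B's chunk transition
theorem pvStep_sim (cs : List (String × List String)) (l : String)
    (hcs : ∀ c ∈ cs, pvGoodSec c.1) :
    pvStepA0 (pvState cs) l = pvState (pvChunkStep cs l) := by
  cases hsec : pvSectionOf l with
  | some s =>
      rw [pvStepA0_header _ l s hsec]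
      simp only [pvChunkStep, hsec]
      simp [pvState, pvCollect_append_header, pvLastSec_append_header]
  | none =>
      simp only [pvChunkStep, hsec]
      cases cs with
      | nil =>
          rw [pvStepA0_body_skip _ l hsec (Or.inr rfl)]
          simp [pvState, pvLastSec, pvAppendLast]
      | cons c cs0 =>
          obtain ⟨p, hp⟩ : ∃ p, (c :: cs0).getLast? = some p := by
            cases hgl : (c :: cs0).getLast? with
            | none => simp at hgl
            | some p => exact ⟨p, rfl⟩
          have hmem : p ∈ c :: cs0 := List.mem_of_getLast? hp
          have hsecp : pvGoodSec p.1 := hcs p hmem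
          have hls : pvLastSec (c :: cs0) = some p.1 := by simp [pvLastSec, hp]
          have hlsA := pvLastSec_appendLast (c :: cs0) l
          have hst1 : (pvState (c :: cs0)).1
              = pvMkD (pvCollect (c :: cs0) "emails") (pvCollect (c :: cs0) "hosts")
                  (pvCollect (c :: cs0) "ips") (pvCollect (c :: cs0) "urls") := rfl
          by_cases hkeep : pvKeep l = true
          · have hCk : ∀ k, pvCollect (pvAppendLast (c :: cs0) l) k
                = pvCollect (c :: cs0) k ++ (if p.1 = k then [l] else []) := by
              intro k
              rw [pvCollect_appendLast (c :: cs0) l k (by simp), hls]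
              by_cases hpk : p.1 = k
              · simp [hpk, hkeep]
              · have hcd : ¬ (some p.1 = some k ∧ pvKeep l = true) := fun hcd =>
                  hpk (Option.some.inj hcd.1)
                simp [hpk]
            rw [pvStepA0_body_keep _ l hsec p.1 hls hkeep, hst1]
            rcases hsecp with h | h | h | h <;> rw [h]
            · rw [pvContains_emails, if_pos rfl, pvModify_emails]
              have h1 := hCk "emails"; have h2 := hCk "hosts"
              have h3 := hCk "ips"; have h4 := hCk "urls"
              rw [h] at h1 h2 h3 h4
              rw [if_neg (by decide)] at h2
              rw [if_neg (by decide)] at h3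
              rw [if_neg (by decide)] at h4
              simp only [List.append_nil] at h2 h3 h4
              simp [pvState, h1, h2, h3, h4, hlsA, hls, h]
            · rw [pvContains_hosts, if_pos rfl, pvModify_hosts]
              have h1 := hCk "emails"; have h2 := hCk "hosts"
              have h3 := hCk "ips"; have h4 := hCk "urls"
              rw [h] at h1 h2 h3 h4
              rw [if_neg (by decide)] at h1
              rw [if_neg (by decide)] at h3
              rw [if_neg (by decide)] at h4
              simp only [List.append_nil] at h1 h3 h4
              simp [pvState, h1, h2, h3, h4, hlsA, hls, h]
            · rw [pvContains_ips, if_pos rfl, pvModify_ips]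
              have h1 := hCk "emails"; have h2 := hCk "hosts"
              have h3 := hCk "ips"; have h4 := hCk "urls"
              rw [h] at h1 h2 h3 h4
              rw [if_neg (by decide)] at h1
              rw [if_neg (by decide)] at h2
              rw [if_neg (by decide)] at h4
              simp only [List.append_nil] at h1 h2 h4
              simp [pvState, h1, h2, h3, h4, hlsA, hls, h]
            · rw [pvContains_urls, if_pos rfl, pvModify_urls]
              have h1 := hCk "emails"; have h2 := hCk "hosts"
              have h3 := hCk "ips"; have h4 := hCk "urls"
              rw [h] at h1 h2 h3 h4
              rw [if_neg (by decide)] at h1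
              rw [if_neg (by decide)] at h2
              rw [if_neg (by decide)] at h3
              simp only [List.append_nil] at h1 h2 h3
              simp [pvState, h1, h2, h3, h4, hlsA, hls, h]
          · have hkf : pvKeep l = false := by
              cases hx : pvKeep l
              · rfl
              · exact absurd hx hkeep
            rw [pvStepA0_body_skip _ l hsec (Or.inl hkf)]
            have hCk : ∀ k, pvCollect (pvAppendLast (c :: cs0) l) k
                = pvCollect (c :: cs0) k := by
              intro k
              rw [pvCollect_appendLast (c :: cs0) l k (by simp),
                  if_neg (fun hcd => hkeep hcd.2), List.append_nil]
            simp [pvState, hCk, hlsA]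

-- the fold-level simulation
theorem pvMain : ∀ (ls : List String) (cs : List (String × List String)),
    (∀ c ∈ cs, pvGoodSec c.1) →
    ls.foldl pvStepA0 (pvState cs) = pvState (ls.foldl pvChunkStep cs)
  | [], _, _ => rfl
  | l :: ls, cs, hcs => by
      rw [List.foldl_cons, List.foldl_cons, pvStep_sim cs l hcs]
      exact pvMain ls (pvChunkStep cs l) (pvChunkStep_sections cs l hcs)

-- ===== VERDICT (by name: the statement is the Claim_ definition above) =====
theorem parse_harvester_text_spec : Claim_equal_parse_harvester_text := by
  intro output _
  show parse_harvester_text output = parse_harvester_text_alt output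
  simp only [parse_harvester_text, parse_harvester_text_alt]
  have h0 : PySem.Dict.ofList
        [("emails", ([] : List String)), ("hosts", []), ("ips", []), ("urls", [])]
      = pvMkD [] [] [] [] := by rfl
  rw [h0]
  have h1 : ((PySem.Str.split? output "\n").getD []).foldl pvStepA (pvMkD [] [] [] [], none)
      = (((PySem.Str.split? output "\n").getD []).map PySem.Str.strip).foldl pvStepA0
          (pvMkD [] [] [] [], none) := by
    rw [List.foldl_map]
    rfl
  rw [h1]
  have h2 : (pvMkD [] [] [] [], (none : Option String)) = pvState [] := rfl
  rw [h2, pvMain _ [] (by simp)]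
  rfl
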